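-- pv_equiv track=rewrite | github.com/vsbpdev/junior-ai | examples/ai_consultation_demo.py | find_optimal_path
-- ===== SOURCE A (Python) =====
-- def find_optimal_path(graph, start, end):
--     """Complex algorithm requiring optimization - will select algorithm-focused AIs"""
--     # O(n³) algorithm - needs optimization
--     paths = []
--
--     # Brute force approach - TODO: optimize this
--     for i in range(len(graph)):
--         for j in range(len(graph)):
--             for k in range(len(graph)):
--                 # Inefficient nested loops
--                 if graph[i][j] and graph[j][k]:
--                     paths.append((i, j, k))
--
--     # Should use Dijkstra's or A* algorithm instead
--     return paths
-- ===== SOURCE B (Python) =====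
-- def find_optimal_path(graph, start, end):
--     """Edge-path enumeration via precomputed successor lists (output-sensitive)."""
--     n = len(graph)
--     succ = [[j for j in range(n) if graph[i][j]] for i in range(n)]
--     paths = []
--     for i in range(n):
--         for j in succ[i]:
--             for k in succ[j]:
--                 paths.append((i, j, k))
--     return paths
-- ===== Notes on version B (the rewrite author's own statement) =====
-- stated objective: alternative
-- what changed: Replaces the O(n^3) triple nested range scan with precomputed per-node successor lists iterated only over existing edges (output-sensitive O(n^2 + output); on dense graphs the output term dominates, so same measured cost), producing the same ascending (i,j,k) order.
import Mathlib
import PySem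

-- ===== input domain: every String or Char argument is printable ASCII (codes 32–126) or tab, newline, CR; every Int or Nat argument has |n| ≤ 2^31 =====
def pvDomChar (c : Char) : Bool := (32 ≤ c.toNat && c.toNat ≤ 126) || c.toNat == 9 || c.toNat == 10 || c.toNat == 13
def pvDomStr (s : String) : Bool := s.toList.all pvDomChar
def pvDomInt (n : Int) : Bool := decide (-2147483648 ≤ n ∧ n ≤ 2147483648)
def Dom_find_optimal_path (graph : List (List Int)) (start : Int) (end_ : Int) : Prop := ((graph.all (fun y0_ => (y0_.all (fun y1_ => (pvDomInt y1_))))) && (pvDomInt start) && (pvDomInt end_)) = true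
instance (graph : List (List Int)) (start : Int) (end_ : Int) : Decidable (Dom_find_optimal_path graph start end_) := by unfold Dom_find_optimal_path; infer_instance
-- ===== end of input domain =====

-- B replaces A's triple nested range scan by precomputed per-node successor lists iterated
-- only over existing edges (output-sensitive); same ascending (i,j,k) order. Objective: alternative.

-- ===== PORT A =====
-- literal port of the triple nested range loop; pyGetD is exact under Pre_ (indices in range)
def find_optimal_path (graph : List (List Int)) (start : Int) (end_ : Int) : List (Int × Int × Int) :=
  let n : Int := (graph.length : Int)
  (PySem.List.pyRange 0 n 1).foldl (fun paths i =>
    (PySem.List.pyRange 0 n 1).foldl (fun paths j =>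
      (PySem.List.pyRange 0 n 1).foldl (fun paths k =>
        if PySem.List.pyGetD (PySem.List.pyGetD graph i []) j 0 != 0 &&
           PySem.List.pyGetD (PySem.List.pyGetD graph j []) k 0 != 0
        then paths ++ [(i, j, k)] else paths) paths) paths) []

-- ===== PORT B =====
def find_optimal_path_alt (graph : List (List Int)) (start : Int) (end_ : Int) : List (Int × Int × Int) :=
  let n : Int := (graph.length : Int)
  let succ : List (List Int) := (PySem.List.pyRange 0 n 1).map (fun i =>
    (PySem.List.pyRange 0 n 1).filter (fun j =>
      PySem.List.pyGetD (PySem.List.pyGetD graph i []) j 0 != 0))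
  (PySem.List.pyRange 0 n 1).foldl (fun paths i =>
    (PySem.List.pyGetD succ i []).foldl (fun paths j =>
      (PySem.List.pyGetD succ j []).foldl (fun paths k =>
        paths ++ [(i, j, k)]) paths) paths) []

-- ===== PRECONDITION & SPEC =====
-- Pre_ excludes exactly the inputs where Python A raises IndexError: some row shorter
-- than the number of rows (graph[i][j] with j up to len(graph)-1).
def Pre_find_optimal_path (graph : List (List Int)) (start : Int) (end_ : Int) : Prop :=
  ∀ row ∈ graph, graph.length ≤ row.length
instance (graph : List (List Int)) (start : Int) (end_ : Int) : Decidable (Pre_find_optimal_path graph start end_) := by unfold Pre_find_optimal_path; infer_instance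
def pvWitness_find_optimal_path : List (List Int) × Int × Int := ([[0, 1], [1, 0]], 0, 1)

def Spec_find_optimal_path (graph : List (List Int)) (start : Int) (end_ : Int) (out : List (Int × Int × Int)) : Prop := out = find_optimal_path_alt graph start end_
instance (graph : List (List Int)) (start : Int) (end_ : Int) (out : List (Int × Int × Int)) : Decidable (Spec_find_optimal_path graph start end_ out) := by unfold Spec_find_optimal_path; infer_instance

-- ===== CLAIM (what is proved, stated in full; the proofs are below) =====
def Claim_equal_find_optimal_path : Prop := ∀ (graph : List (List Int)) (start : Int) (end_ : Int), Dom_find_optimal_path graph start end_ → Pre_find_optimal_path graph start end_ → Spec_find_optimal_path graph start end_ (find_optimal_path graph start end_)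

-- ===== LEMMAS AND PROOFS =====

theorem flatMap_if_eq_filter_flatMap {α β : Type} (l : List α) (p : α → Bool) (h : α → List β) :
    (l.flatMap fun x => if p x then h x else []) = (l.filter p).flatMap h := by
  induction l with
  | nil => rfl
  | cons a t ih =>
      by_cases hpa : p a = true <;>
        simp [List.flatMap_cons, hpa, ih]

-- ===== VERDICT (by name: the statement is the Claim_ definition above) =====
theorem find_optimal_path_spec : Claim_equal_find_optimal_path := by
  intro graph start end_ _hdom _hpre
  unfold Spec_find_optimal_path find_optimal_path find_optimal_path_alt
  simp only [PySem.List.foldl_append_if, PySem.List.foldl_append_singleton_eq_map,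
    PySem.List.foldl_append_eq_flatMap, List.nil_append]
  apply List.flatMap_congr
  intro i hi
  obtain ⟨hi0, hin⟩ := (PySem.List.mem_pyRange_one).mp hi
  rw [PySem.List.pyGetD_map_pyRange_of_nonneg _ _ _ _ hi0 hin]
  have step : ∀ j ∈ PySem.List.pyRange 0 (graph.length : Int) 1,
      ((PySem.List.pyRange 0 (graph.length : Int) 1).filter (fun k =>
          PySem.List.pyGetD (PySem.List.pyGetD graph i []) j 0 != 0 &&
          PySem.List.pyGetD (PySem.List.pyGetD graph j []) k 0 != 0)).map (fun k => (i, j, k)) =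
      if (PySem.List.pyGetD (PySem.List.pyGetD graph i []) j 0 != 0) then
        (((PySem.List.pyRange 0 (graph.length : Int) 1).filter (fun k =>
          PySem.List.pyGetD (PySem.List.pyGetD graph j []) k 0 != 0)).map (fun k => (i, j, k)))
      else [] := by
    intro j _hj
    by_cases hc : (PySem.List.pyGetD (PySem.List.pyGetD graph i []) j 0 != 0) = true
    · simp [hc]
    · simp at hc
      simp [hc]
  rw [List.flatMap_congr step, flatMap_if_eq_filter_flatMap]
  apply List.flatMap_congr
  intro j hj
  have hjR := List.mem_filter.mp hj |>.1
  obtain ⟨hj0, hjn⟩ := (PySem.List.mem_pyRange_one).mp hjR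
  rw [PySem.List.pyGetD_map_pyRange_of_nonneg _ _ _ _ hj0 hjn]
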